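-- pv_equiv track=rewrite | github.com/krunaldsoni/uscis | track_uscis_case_status.py | count_entries_from_db
-- ===== SOURCE A (Python) =====
-- FINGER_PRINT_FEE_RX       = 'Fingerprint Fee Was Received'
--
-- CASE_APPROVED             = 'Case Was Approved'
--
-- CASE_REJECTED             = 'Case Rejected'
--
-- CASE_RECEIVED             = 'Case Received'
--
-- INTERVIEW_READY           = 'Ready for Interview'
--
-- CASE_RFE                  = 'RFE'
--
-- CASE_TRANSFERRED          = 'Case Transferred'
--
-- NAME_UPDATED              = 'Name Updated'
--
-- FINGER_PRINT_TAKEN        = 'Fingerprints Taken'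
--
-- def count_entries_from_db(db):
--     numTotalCase = 0
--     numApproved = 0
--     numRejected = 0
--     numFPReceived = 0
--     numReceived = 0
--     numInterview = 0
--     numRFE = 0
--     numTransfer = 0
--     numNameUpdated = 0
--     FingerPrintTaken = 0
--
--     for case in db:
--       numTotalCase += 1
--       if db[case]==FINGER_PRINT_FEE_RX:
--         numFPReceived += 1
--       elif db[case]==CASE_APPROVED:
--         numApproved += 1
--       elif db[case]==CASE_REJECTED:
--         numRejected += 1
--       elif db[case]==CASE_RECEIVED:
--         numReceived += 1
--       elif db[case]==INTERVIEW_READY: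
--         numInterview += 1
--       elif db[case]==CASE_RFE:
--         numRFE += 1
--       elif db[case]==CASE_TRANSFERRED:
--         numTransfer += 1
--       elif db[case]==NAME_UPDATED:
--         numNameUpdated += 1
--       elif db[case]==FINGER_PRINT_TAKEN:
--         FingerPrintTaken += 1
--     return numTotalCase, numApproved, numRejected, numFPReceived, numReceived, numInterview, numRFE, numTransfer, numNameUpdated, FingerPrintTaken
-- ===== SOURCE B (Python) =====
-- FINGER_PRINT_FEE_RX       = 'Fingerprint Fee Was Received'
-- CASE_APPROVED             = 'Case Was Approved'
-- CASE_REJECTED             = 'Case Rejected'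
-- CASE_RECEIVED             = 'Case Received'
-- INTERVIEW_READY           = 'Ready for Interview'
-- CASE_RFE                  = 'RFE'
-- CASE_TRANSFERRED          = 'Case Transferred'
-- NAME_UPDATED              = 'Name Updated'
-- FINGER_PRINT_TAKEN        = 'Fingerprints Taken'
--
-- def count_entries_from_db(db):
--     # staged passes: one scan per category with list.count, no accumulator state
--     vals = list(db.values())
--     return (len(vals),
--             vals.count(CASE_APPROVED),
--             vals.count(CASE_REJECTED),
--             vals.count(FINGER_PRINT_FEE_RX),
--             vals.count(CASE_RECEIVED),
--             vals.count(INTERVIEW_READY),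
--             vals.count(CASE_RFE),
--             vals.count(CASE_TRANSFERRED),
--             vals.count(NAME_UPDATED),
--             vals.count(FINGER_PRINT_TAKEN))
-- ===== Notes on version B (the rewrite author's own statement) =====
-- stated objective: simpler
-- what changed: Replaces A's single stateful pass with a nine-branch if/elif ladder updating ten counter variables by stateless staged passes: extract the values once, then read each category off with an independent list.count scan (len for the total).
import Mathlib
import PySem

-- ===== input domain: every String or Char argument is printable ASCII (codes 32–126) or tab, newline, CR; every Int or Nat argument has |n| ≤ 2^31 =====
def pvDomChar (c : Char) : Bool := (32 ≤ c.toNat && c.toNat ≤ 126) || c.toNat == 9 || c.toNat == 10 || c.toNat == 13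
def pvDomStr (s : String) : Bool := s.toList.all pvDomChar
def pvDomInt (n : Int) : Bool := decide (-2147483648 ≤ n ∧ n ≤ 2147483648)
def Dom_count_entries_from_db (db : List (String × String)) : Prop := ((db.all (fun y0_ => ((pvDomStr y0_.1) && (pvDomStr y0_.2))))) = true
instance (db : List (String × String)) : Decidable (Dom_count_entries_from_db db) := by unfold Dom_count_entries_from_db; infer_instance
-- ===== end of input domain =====

-- B replaces A's single stateful pass (nine-branch if/elif ladder over ten counters) by stateless
-- staged passes: extract the values once, then one independent list.count scan per category (objective: simpler).

def FINGER_PRINT_FEE_RX : String := "Fingerprint Fee Was Received"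
def CASE_APPROVED : String := "Case Was Approved"
def CASE_REJECTED : String := "Case Rejected"
def CASE_RECEIVED : String := "Case Received"
def INTERVIEW_READY : String := "Ready for Interview"
def CASE_RFE : String := "RFE"
def CASE_TRANSFERRED : String := "Case Transferred"
def NAME_UPDATED : String := "Name Updated"
def FINGER_PRINT_TAKEN : String := "Fingerprints Taken"

-- ===== PORT A =====
-- dict iteration: 'for case in db' walks the keys; 'db[case]' is the entry's value (dict keys are unique)
-- the body of A's for-loop (per-entry if/elif ladder), used by the port and the proof
def stepA (s : Int × Int × Int × Int × Int × Int × Int × Int × Int × Int) (case : String × String) :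
    Int × Int × Int × Int × Int × Int × Int × Int × Int × Int :=
  let (t, a, r, f, rc, iv, rfe, tr, nu, fp) := s
  let v := case.2
  let t := t + 1
  if v = FINGER_PRINT_FEE_RX then (t, a, r, f + 1, rc, iv, rfe, tr, nu, fp)
  else if v = CASE_APPROVED then (t, a + 1, r, f, rc, iv, rfe, tr, nu, fp)
  else if v = CASE_REJECTED then (t, a, r + 1, f, rc, iv, rfe, tr, nu, fp)
  else if v = CASE_RECEIVED then (t, a, r, f, rc + 1, iv, rfe, tr, nu, fp)
  else if v = INTERVIEW_READY then (t, a, r, f, rc, iv + 1, rfe, tr, nu, fp)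
  else if v = CASE_RFE then (t, a, r, f, rc, iv, rfe + 1, tr, nu, fp)
  else if v = CASE_TRANSFERRED then (t, a, r, f, rc, iv, rfe, tr + 1, nu, fp)
  else if v = NAME_UPDATED then (t, a, r, f, rc, iv, rfe, tr, nu + 1, fp)
  else if v = FINGER_PRINT_TAKEN then (t, a, r, f, rc, iv, rfe, tr, nu, fp + 1)
  else (t, a, r, f, rc, iv, rfe, tr, nu, fp)

def count_entries_from_db (db : List (String × String)) : Int × Int × Int × Int × Int × Int × Int × Int × Int × Int :=
  db.foldl stepA (0, 0, 0, 0, 0, 0, 0, 0, 0, 0)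

-- ===== PORT B =====
-- vals = list(db.values()); list.count per category (PySem.List.count = Python's list.count)
def count_entries_from_db_alt (db : List (String × String)) : Int × Int × Int × Int × Int × Int × Int × Int × Int × Int :=
  let vals := db.map (·.2)
  ((vals.length : Int),
   (PySem.List.count vals CASE_APPROVED : Int),
   (PySem.List.count vals CASE_REJECTED : Int),
   (PySem.List.count vals FINGER_PRINT_FEE_RX : Int),
   (PySem.List.count vals CASE_RECEIVED : Int),
   (PySem.List.count vals INTERVIEW_READY : Int),
   (PySem.List.count vals CASE_RFE : Int),
   (PySem.List.count vals CASE_TRANSFERRED : Int),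
   (PySem.List.count vals NAME_UPDATED : Int),
   (PySem.List.count vals FINGER_PRINT_TAKEN : Int))

-- ===== PRECONDITION & SPEC =====
def Spec_count_entries_from_db (db : List (String × String)) (out : Int × Int × Int × Int × Int × Int × Int × Int × Int × Int) : Prop := out = count_entries_from_db_alt db
instance (db : List (String × String)) (out : Int × Int × Int × Int × Int × Int × Int × Int × Int × Int) : Decidable (Spec_count_entries_from_db db out) := by
  unfold Spec_count_entries_from_db
  haveI h2 : DecidableEq (Int × Int) := inferInstance
  haveI h3 : DecidableEq (Int × Int × Int) := inferInstance
  haveI h4 : DecidableEq (Int × Int × Int × Int) := inferInstance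
  haveI h5 : DecidableEq (Int × Int × Int × Int × Int) := inferInstance
  haveI h6 : DecidableEq (Int × Int × Int × Int × Int × Int) := inferInstance
  haveI h7 : DecidableEq (Int × Int × Int × Int × Int × Int × Int) := inferInstance
  haveI h8 : DecidableEq (Int × Int × Int × Int × Int × Int × Int × Int) := inferInstance
  haveI h9 : DecidableEq (Int × Int × Int × Int × Int × Int × Int × Int × Int) := inferInstance
  exact instDecidableEqProd out (count_entries_from_db_alt db)

-- ===== CLAIM =====
def Claim_equal_count_entries_from_db : Prop := ∀ (db : List (String × String)), Dom_count_entries_from_db db → Spec_count_entries_from_db db (count_entries_from_db db)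

-- ===== LEMMAS AND PROOFS =====

-- stepA applied to an explicit accumulator tuple, written out
theorem stepA_eval (t a r f rc iv rfe tr nu fp : Int) (case : String × String) :
    stepA (t, a, r, f, rc, iv, rfe, tr, nu, fp) case =
      if case.2 = FINGER_PRINT_FEE_RX then (t + 1, a, r, f + 1, rc, iv, rfe, tr, nu, fp)
      else if case.2 = CASE_APPROVED then (t + 1, a + 1, r, f, rc, iv, rfe, tr, nu, fp)
      else if case.2 = CASE_REJECTED then (t + 1, a, r + 1, f, rc, iv, rfe, tr, nu, fp)
      else if case.2 = CASE_RECEIVED then (t + 1, a, r, f, rc + 1, iv, rfe, tr, nu, fp)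
      else if case.2 = INTERVIEW_READY then (t + 1, a, r, f, rc, iv + 1, rfe, tr, nu, fp)
      else if case.2 = CASE_RFE then (t + 1, a, r, f, rc, iv, rfe + 1, tr, nu, fp)
      else if case.2 = CASE_TRANSFERRED then (t + 1, a, r, f, rc, iv, rfe, tr + 1, nu, fp)
      else if case.2 = NAME_UPDATED then (t + 1, a, r, f, rc, iv, rfe, tr, nu + 1, fp)
      else if case.2 = FINGER_PRINT_TAKEN then (t + 1, a, r, f, rc, iv, rfe, tr, nu, fp + 1)
      else (t + 1, a, r, f, rc, iv, rfe, tr, nu, fp) := rfl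

-- A's fold, from an arbitrary accumulator, adds the length and the per-status value counts
theorem foldA_counts (db : List (String × String))
    (t a r f rc iv rfe tr nu fp : Int) :
    db.foldl stepA (t, a, r, f, rc, iv, rfe, tr, nu, fp)
    = (t + db.length,
       a + ((db.map (·.2)).count CASE_APPROVED : Int),
       r + ((db.map (·.2)).count CASE_REJECTED : Int),
       f + ((db.map (·.2)).count FINGER_PRINT_FEE_RX : Int),
       rc + ((db.map (·.2)).count CASE_RECEIVED : Int),
       iv + ((db.map (·.2)).count INTERVIEW_READY : Int),
       rfe + ((db.map (·.2)).count CASE_RFE : Int),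
       tr + ((db.map (·.2)).count CASE_TRANSFERRED : Int),
       nu + ((db.map (·.2)).count NAME_UPDATED : Int),
       fp + ((db.map (·.2)).count FINGER_PRINT_TAKEN : Int)) := by
  induction db generalizing t a r f rc iv rfe tr nu fp with
  | nil => simp
  | cons p tl ih =>
    rw [List.foldl_cons, stepA_eval]
    split_ifs with h1 h2 h3 h4 h5 h6 h7 h8 h9 <;>
    · rw [ih]
      simp only [List.map_cons, List.count_cons, List.length_cons, Prod.mk.injEq, beq_iff_eq,
        FINGER_PRINT_FEE_RX, CASE_APPROVED, CASE_REJECTED, CASE_RECEIVED, INTERVIEW_READY,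
        CASE_RFE, CASE_TRANSFERRED, NAME_UPDATED, FINGER_PRINT_TAKEN] at *
      simp_all
      omega

-- ===== VERDICT =====
theorem count_entries_from_db_spec : Claim_equal_count_entries_from_db := by
  intro db _
  show count_entries_from_db db = count_entries_from_db_alt db
  rw [count_entries_from_db, count_entries_from_db_alt, foldA_counts]
  simp [PySem.List.count_eq]
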